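-- pv_equiv track=rewrite | github.com/seojeongbin/algorithm | Programmers/Level_1/normal_type/test_4.py | solution
-- ===== SOURCE A (Python) =====
-- def solution(phone_number):
--
--     criteria = 4
--     length = len(phone_number)
--     result = ''
--
--     # condition = True
--     for idx, number in enumerate(phone_number) :
--         if length - idx <= criteria :
--             number = '*'
--         else :
--             number = number
--         # result.append(number) !!! 리스트 []와 다르게 빈 문자열 ''경우 append 불가 => += 이런식으로 해야함
--         result += number
--     return result
-- ===== SOURCE B (Python) =====
-- def solution(phone_number):
--     n = len(phone_number)
--     k = min(n, 4)
--     return phone_number[:n - k] + '*' * k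
-- ===== Notes on version B (the rewrite author's own statement) =====
-- stated objective: simpler
-- what changed: Replaces A's per-character enumerate loop with quadratic string accumulation by a closed form: keep the first n-min(n,4) characters via one slice and append min(n,4) asterisks.
import Mathlib
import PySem

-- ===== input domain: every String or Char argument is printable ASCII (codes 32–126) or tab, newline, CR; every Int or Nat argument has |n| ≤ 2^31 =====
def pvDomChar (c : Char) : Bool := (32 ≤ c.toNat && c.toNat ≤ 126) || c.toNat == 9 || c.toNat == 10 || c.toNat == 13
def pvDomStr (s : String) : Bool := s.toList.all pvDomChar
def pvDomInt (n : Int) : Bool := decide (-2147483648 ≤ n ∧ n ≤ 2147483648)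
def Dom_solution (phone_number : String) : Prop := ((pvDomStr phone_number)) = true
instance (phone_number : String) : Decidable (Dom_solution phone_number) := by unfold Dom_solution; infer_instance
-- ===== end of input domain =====

-- B replaces A's per-character enumerate loop by a closed form (one slice + min(n,4) asterisks); objective: simpler.

-- ===== PORT A =====
-- literal transliteration: enumerate loop accumulating into `result` with +=
def solution (phone_number : String) : String :=
  let criteria : Int := 4
  let length : Int := (phone_number.toList.length : Int)
  (PySem.List.enumerate phone_number.toList).foldl
    (fun result p => result ++ String.ofList [if length - p.1 ≤ criteria then '*' else p.2]) ""

-- ===== PORT B =====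
-- phone_number[:n-k] with 0 ≤ n-k ≤ n is exactly List.take (n-k); '*' * k is List.replicate k '*'
def solution_alt (phone_number : String) : String :=
  let n := phone_number.toList.length
  let k := min n 4
  String.ofList (phone_number.toList.take (n - k) ++ List.replicate k '*')

-- ===== PRECONDITION & SPEC =====
def Spec_solution (phone_number : String) (out : String) : Prop := out = solution_alt phone_number
instance (phone_number : String) (out : String) : Decidable (Spec_solution phone_number out) := by unfold Spec_solution; infer_instance

-- ===== CLAIM (what is proved, stated in full; the proofs are below) =====
def Claim_equal_solution : Prop := ∀ (phone_number : String), Dom_solution phone_number → Spec_solution phone_number (solution phone_number)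

-- ===== LEMMAS AND PROOFS =====

-- the accumulating fold is the String.ofList of the mapped list
theorem pv_foldl_mk (f : Int × Char → Char) (l : List (Int × Char)) (s : String) :
    l.foldl (fun result p => result ++ String.ofList [f p]) s = s ++ String.ofList (l.map f) := by
  induction l generalizing s with
  | nil =>
      apply String.toList_injective
      simp
  | cons x xs ih =>
      simp only [List.foldl_cons, List.map_cons, ih]
      apply String.toList_injective
      simp

-- the mapped enumerate list is the closed form
theorem pv_map_enumerate (cs : List Char) :
    (PySem.List.enumerate cs).map
        (fun p => if (cs.length : Int) - p.1 ≤ 4 then '*' else p.2)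
      = cs.take (cs.length - min cs.length 4) ++ List.replicate (min cs.length 4) '*' := by
  apply List.ext_getElem
  · simp [PySem.List.length_enumerate]; try omega
  · intro i h1 h2
    have hi : i < cs.length := by
      simpa [PySem.List.length_enumerate] using h1
    simp only [List.getElem_map, PySem.List.getElem_enumerate]
    by_cases hc : i < cs.length - min cs.length 4
    · rw [List.getElem_append_left (by simpa using hc)]
      simp only [List.getElem_take]
      split
      next h => exact absurd h (by omega)
      next h => rfl
    · rw [List.getElem_append_right (by simpa using hc)]
      simp only [List.getElem_replicate]
      split
      next h => rfl
      next h => exact absurd h (by omega)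

-- ===== VERDICT (by name: the statement is the Claim_ definition above) =====
theorem solution_spec : Claim_equal_solution := by
  intro phone_number _
  unfold Spec_solution solution solution_alt
  rw [pv_foldl_mk, pv_map_enumerate]
  apply String.toList_injective
  simp
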